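-- pv_equiv track=rewrite | github.com/yu0ki/one_row_keyboard | preprocessors.py | ame_to_possible_chars
-- ===== SOURCE A (Python) =====
-- ascii_list = [(i, chr(i)) for i in range(32, 65)] + [(i, chr(i)) for i in range(95, 127)]
--
-- def ame_to_possible_chars(ame:int):
--     if ame == 9:
--         return ["<sp>"]
--
--     if ame == 10:
--         return ["<cls>"]
--
--     if ame == 11:
--         return ["<sep>"]
--
--     if ame == 0:
--         return ["<pad>"]
--
--     chars = []
--     if ame == 8:
--         for (i, c) in ascii_list:
--             if i % 8 == 0:
--                 chars.append(c)
--     else: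
--         for (i, c) in ascii_list:
--             if i % 8 == ame:
--                 chars.append(c)
--     if " " in chars:
--         chars.remove(" ")
--
--     return chars
-- ===== SOURCE B (Python) =====
-- def ame_to_possible_chars(ame: int):
--     if ame == 9:
--         return ["<sp>"]
--     if ame == 10:
--         return ["<cls>"]
--     if ame == 11:
--         return ["<sep>"]
--     if ame == 0:
--         return ["<pad>"]
--     r = 0 if ame == 8 else ame
--     if r < 0 or r > 7:
--         return []
--     chars = []
--     for lo, hi in ((32, 65), (95, 127)):
--         start = lo + (r - lo) % 8
--         chars.extend(chr(i) for i in range(start, hi, 8))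
--     if " " in chars:
--         chars.remove(" ")
--     return chars
-- ===== Notes on version B (the rewrite author's own statement) =====
-- stated objective: simpler
-- what changed: B drops the precomputed ascii_list and its full per-element scan with a modulus test, and instead directly generates the matching code points of each ASCII window with a stepped range after guarding the residue to its valid band.
import Mathlib
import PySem

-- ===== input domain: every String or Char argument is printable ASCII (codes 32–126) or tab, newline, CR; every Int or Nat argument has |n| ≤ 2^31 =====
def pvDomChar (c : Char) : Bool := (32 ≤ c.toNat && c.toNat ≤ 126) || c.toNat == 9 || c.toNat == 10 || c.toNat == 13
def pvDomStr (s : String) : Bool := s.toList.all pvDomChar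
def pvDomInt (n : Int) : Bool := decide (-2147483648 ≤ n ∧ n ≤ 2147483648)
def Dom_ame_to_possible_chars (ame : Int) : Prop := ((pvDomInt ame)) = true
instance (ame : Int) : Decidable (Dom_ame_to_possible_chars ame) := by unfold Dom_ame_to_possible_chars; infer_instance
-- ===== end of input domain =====

-- B replaces A's full scan of ascii_list with direct generation of the matching
-- code points via range(start, hi, 8) over the two ASCII windows (objective: simpler).

-- ===== PORT A =====
-- chr(i) for an ASCII code point (exact on the codes 32..126 used here)
def pvChr (i : Int) : String := String.mk [Char.ofNat i.toNat]

-- ascii_list = [(i, chr(i)) for i in range(32, 65)] + [(i, chr(i)) for i in range(95, 127)]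
def asciiList : List (Int × String) :=
  (PySem.List.pyRange 32 65 1).map (fun i => (i, pvChr i)) ++
  (PySem.List.pyRange 95 127 1).map (fun i => (i, pvChr i))

def ame_to_possible_chars (ame : Int) : List String :=
  if ame = 9 then ["<sp>"]
  else if ame = 10 then ["<cls>"]
  else if ame = 11 then ["<sep>"]
  else if ame = 0 then ["<pad>"]
  else
    let chars : List String :=
      if ame = 8 then
        asciiList.foldl (fun acc p => if PySem.Int.mod p.1 8 = 0 then acc ++ [p.2] else acc) []
      else
        asciiList.foldl (fun acc p => if PySem.Int.mod p.1 8 = ame then acc ++ [p.2] else acc) []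
    if " " ∈ chars then (PySem.List.remove? chars " ").getD chars else chars

-- ===== PORT B =====
def ame_to_possible_chars_alt (ame : Int) : List String :=
  if ame = 9 then ["<sp>"]
  else if ame = 10 then ["<cls>"]
  else if ame = 11 then ["<sep>"]
  else if ame = 0 then ["<pad>"]
  else
    let r : Int := if ame = 8 then 0 else ame
    if r < 0 ∨ 7 < r then []
    else
      let chars : List String :=
        [((32:Int), (65:Int)), (95, 127)].foldl
          (fun acc w => acc ++ (PySem.List.pyRange (w.1 + PySem.Int.mod (r - w.1) 8) w.2 8).map pvChr) []
      if " " ∈ chars then (PySem.List.remove? chars " ").getD chars else chars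

-- ===== PRECONDITION & SPEC =====
def Spec_ame_to_possible_chars (ame : Int) (out : List String) : Prop := out = ame_to_possible_chars_alt ame
instance (ame : Int) (out : List String) : Decidable (Spec_ame_to_possible_chars ame out) := by unfold Spec_ame_to_possible_chars; infer_instance

-- ===== CLAIM (what is proved, stated in full; the proofs are below) =====
def Claim_equal_ame_to_possible_chars : Prop := ∀ (ame : Int), Dom_ame_to_possible_chars ame → Spec_ame_to_possible_chars ame (ame_to_possible_chars ame)

-- ===== LEMMAS AND PROOFS =====

-- A's filtering fold keeps its accumulator when the condition holds of no element.
theorem foldl_filter_none {α β : Type} (l : List α) (c : α → Prop) [DecidablePred c]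
    (f : α → β) (acc : List β) (h : ∀ p ∈ l, ¬ c p) :
    l.foldl (fun acc p => if c p then acc ++ [f p] else acc) acc = acc := by
  induction l generalizing acc with
  | nil => rfl
  | cons x xs ih =>
    simp only [List.foldl_cons]
    rw [if_neg (h x (by simp))]
    exact ih acc (fun p hp => h p (by simp [hp]))

-- residues of asciiList codes are in 0..7, so an out-of-range ame matches nothing
theorem A_out_of_range (ame : Int) (h : ame < 0 ∨ 7 < ame) :
    asciiList.foldl (fun acc p => if PySem.Int.mod p.1 8 = ame then acc ++ [p.2] else acc)
      ([] : List String) = [] := by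
  apply foldl_filter_none
  intro p _
  have h1 : (0:Int) ≤ PySem.Int.mod p.1 8 := PySem.Int.mod_nonneg _ (by norm_num)
  have h2 : PySem.Int.mod p.1 8 < 8 := PySem.Int.mod_lt _ (by norm_num)
  omega

-- ===== VERDICT (by name: the statement is the Claim_ definition above) =====
theorem ame_to_possible_chars_spec : Claim_equal_ame_to_possible_chars := by
  intro ame _
  unfold Spec_ame_to_possible_chars
  by_cases hlo : 0 ≤ ame
  · by_cases hhi : ame ≤ 11
    · interval_cases ame <;> decide
    · -- ame > 11: both sides are []
      have h9 : ame ≠ 9 := by omega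
      have h10 : ame ≠ 10 := by omega
      have h11 : ame ≠ 11 := by omega
      have h0 : ame ≠ 0 := by omega
      have h8 : ame ≠ 8 := by omega
      rw [ame_to_possible_chars, ame_to_possible_chars_alt]
      simp only [if_neg h9, if_neg h10, if_neg h11, if_neg h0, if_neg h8]
      rw [if_pos (by right; omega : ame < 0 ∨ 7 < ame)]
      rw [A_out_of_range ame (by omega)]
      simp
  · -- ame < 0: both sides are []
    have h9 : ame ≠ 9 := by omega
    have h10 : ame ≠ 10 := by omega
    have h11 : ame ≠ 11 := by omega
    have h0 : ame ≠ 0 := by omega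
    have h8 : ame ≠ 8 := by omega
    rw [ame_to_possible_chars, ame_to_possible_chars_alt]
    simp only [if_neg h9, if_neg h10, if_neg h11, if_neg h0, if_neg h8]
    rw [if_pos (by left; omega : ame < 0 ∨ 7 < ame)]
    rw [A_out_of_range ame (by omega)]
    simp
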